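-- pv_equiv track=rewrite | github.com/joannku/journaling | src/modules/QualtricsProcessing.py | has_consecutive_answers
-- ===== SOURCE A (Python) =====
-- def has_consecutive_answers(series, threshold=10):
--     """
--     Check if the series has more than 'threshold' consecutive identical answers.
--     """
--     count = 0
--     last_answer = None
--     for answer in series:
--         if answer == last_answer:
--             count += 1
--             if count > threshold:
--                 return True
--         else:
--             count = 1
--             last_answer = answer
--     return False
-- ===== SOURCE B (Python) =====
-- def has_consecutive_answers(series, threshold=10):
--     """
--     Split the series into maximal runs of consecutive equal values with a
--     two-pointer scan and test whether any run is longer than the threshold.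
--     """
--     i, n = 0, len(series)
--     while i < n:
--         j = i
--         while j < n and series[j] == series[i]:
--             j += 1
--         if j - i > threshold:
--             return True
--         i = j
--     return False
-- ===== Notes on version B (the rewrite author's own statement) =====
-- stated objective: simpler
-- what changed: B splits the series into maximal runs of consecutive equal values with a two-pointer scan and tests each run's length against the threshold, instead of A's running counter with a last-value sentinel checked after every increment.
-- intended difference: For threshold <= 0 on a nonempty series with no two adjacent equal elements, A returns False (its check only fires after a repeat, so runs of length 1 are never tested) while B returns True, which is intended since every length-1 run already exceeds a non-positive threshold. — e.g. on has_consecutive_answers([1, 2, 3], 0): A returns false, B returns true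
import Mathlib
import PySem

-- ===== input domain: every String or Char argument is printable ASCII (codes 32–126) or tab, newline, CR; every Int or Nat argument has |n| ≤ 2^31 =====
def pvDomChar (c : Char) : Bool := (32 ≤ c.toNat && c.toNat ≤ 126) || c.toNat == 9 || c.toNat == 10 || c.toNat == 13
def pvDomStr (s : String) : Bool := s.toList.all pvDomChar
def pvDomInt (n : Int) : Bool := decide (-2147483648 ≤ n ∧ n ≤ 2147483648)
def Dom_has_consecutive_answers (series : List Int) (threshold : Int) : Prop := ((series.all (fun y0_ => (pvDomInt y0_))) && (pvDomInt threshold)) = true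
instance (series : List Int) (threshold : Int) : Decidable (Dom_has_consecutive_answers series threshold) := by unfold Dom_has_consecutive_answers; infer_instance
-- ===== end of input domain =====

-- B replaces A's running counter + last-value sentinel by a two-pointer scan over
-- maximal runs of consecutive equal values (simpler decomposition; same cost).


-- ===== PORT A =====
-- A's for-loop with early return: state = (last_answer : Option Int, count : Int).
def hcaLoopA : List Int → Int → Option Int → Int → Bool
  | [], _, _, _ => false
  | answer :: rest, threshold, last, count =>
    if some answer = last then
      if count + 1 > threshold then true
      else hcaLoopA rest threshold last (count + 1)
    else hcaLoopA rest threshold (some answer) 1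

def has_consecutive_answers (series : List Int) (threshold : Int) : Bool :=
  hcaLoopA series threshold none 0

-- ===== PORT B =====
-- inner while of Source B: length of the maximal run of x at the front, and the remainder
def runLen (x : Int) : List Int → Nat × List Int
  | [] => (0, [])
  | y :: rest =>
    if y = x then
      let p := runLen x rest
      (p.1 + 1, p.2)
    else (0, y :: rest)

theorem runLen_le (x : Int) (l : List Int) : (runLen x l).2.length ≤ l.length := by
  induction l with
  | nil => simp [runLen]
  | cons y rest ih =>
    simp only [runLen]
    split
    · simpa using Nat.le_succ_of_le ih
    · simp

-- outer while of Source B: take a maximal run, test its length, continue on the remainder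
def altLoop : List Int → Int → Bool
  | [], _ => false
  | x :: rest, threshold =>
    let p := runLen x rest
    if ((p.1 + 1 : Nat) : Int) > threshold then true
    else altLoop p.2 threshold
termination_by l => l.length
decreasing_by exact Nat.lt_succ_of_le (runLen_le x rest)

def has_consecutive_answers_alt (series : List Int) (threshold : Int) : Bool :=
  altLoop series threshold

-- ===== PRECONDITION & SPEC =====
-- For threshold ≤ 0 on a nonempty series with no two adjacent equal elements, A returns
-- False (its check only fires after a repeat, so runs of length 1 are never tested) while
-- B returns True, which is intended: every length-1 run already exceeds such a threshold.
def D_has_consecutive_answers (series : List Int) (threshold : Int) : Prop :=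
  threshold ≤ 0 ∧ series ≠ [] ∧ List.IsChain (· ≠ ·) series
instance (series : List Int) (threshold : Int) : Decidable (D_has_consecutive_answers series threshold) := by unfold D_has_consecutive_answers; infer_instance

def Spec_has_consecutive_answers (series : List Int) (threshold : Int) (out : Bool) : Prop := ¬ D_has_consecutive_answers series threshold → out = has_consecutive_answers_alt series threshold
instance (series : List Int) (threshold : Int) (out : Bool) : Decidable (Spec_has_consecutive_answers series threshold out) := by unfold Spec_has_consecutive_answers; infer_instance

def pvDiffWitness_has_consecutive_answers : List Int × Int := ([1, 2, 3], 0)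
def pvDiffWitnessOut_has_consecutive_answers : Bool × Bool := (false, true)

-- ===== CLAIM (what is proved, stated in full; the proofs are below) =====
def Claim_unchanged_has_consecutive_answers : Prop := ∀ (series : List Int) (threshold : Int), Dom_has_consecutive_answers series threshold → Spec_has_consecutive_answers series threshold (has_consecutive_answers series threshold)
def Claim_changed_has_consecutive_answers : Prop := Dom_has_consecutive_answers (pvDiffWitness_has_consecutive_answers.1) (pvDiffWitness_has_consecutive_answers.2) ∧ D_has_consecutive_answers (pvDiffWitness_has_consecutive_answers.1) (pvDiffWitness_has_consecutive_answers.2) ∧ has_consecutive_answers (pvDiffWitness_has_consecutive_answers.1) (pvDiffWitness_has_consecutive_answers.2) = pvDiffWitnessOut_has_consecutive_answers.1 ∧ has_consecutive_answers_alt (pvDiffWitness_has_consecutive_answers.1) (pvDiffWitness_has_consecutive_answers.2) = pvDiffWitnessOut_has_consecutive_answers.2 ∧ pvDiffWitnessOut_has_consecutive_answers.1 ≠ pvDiffWitnessOut_has_consecutive_answers.2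
def Claim_exact_has_consecutive_answers : Prop := ∀ (series : List Int) (threshold : Int), Dom_has_consecutive_answers series threshold → D_has_consecutive_answers series threshold → has_consecutive_answers series threshold ≠ has_consecutive_answers_alt series threshold

-- ===== LEMMAS AND PROOFS =====

-- A's loop across one maximal run of x: it fires iff the run is nonempty and pushes the
-- count past the threshold; otherwise it continues on the remainder with the grown count.
theorem loopA_run (thr : Int) (l : List Int) : ∀ (x c : Int), 0 ≤ c →
    hcaLoopA l thr (some x) c =
      ((decide (1 ≤ (runLen x l).1) && decide (c + (runLen x l).1 > thr))
        || hcaLoopA (runLen x l).2 thr (some x) (c + (runLen x l).1)) := by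
  induction l with
  | nil => intro x c _; simp [runLen, hcaLoopA]
  | cons y rest ih =>
    intro x c hc
    by_cases hyx : y = x
    · subst hyx
      have hr : runLen y (y :: rest) = ((runLen y rest).1 + 1, (runLen y rest).2) := by
        simp [runLen]
      rw [hr]
      show (if some y = some y then
              if c + 1 > thr then true else hcaLoopA rest thr (some y) (c + 1)
            else hcaLoopA rest thr (some y) 1) = _
      rw [if_pos rfl]
      by_cases htr : c + 1 > thr
      · rw [if_pos htr]
        have h2 : thr < c + (((runLen y rest).1 : Int) + 1) := by
          have : (0 : Int) ≤ ((runLen y rest).1 : Int) := Int.natCast_nonneg _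
          omega
        simp
        exact Or.inl h2
      · rw [if_neg htr, ih y (c + 1) (by omega)]
        have h1 : c + (((runLen y rest).1 + 1 : Nat) : Int) = c + 1 + (runLen y rest).1 := by
          push_cast; ring
        rw [h1]
        by_cases hn : 1 ≤ (runLen y rest).1
        · simp [hn]
        · have hn0 : (runLen y rest).1 = 0 := by omega
          simp only [hn0]
          simp
          exact fun h => absurd h (by omega)
    · simp [runLen, hyx, hcaLoopA]

theorem runLen_head (x : Int) (l : List Int) :
    ∀ y, (runLen x l).2.head? = some y → y ≠ x := by
  induction l with
  | nil => intro y h; simp [runLen] at h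
  | cons z rest ih =>
    intro y h
    by_cases hz : z = x
    · exact ih y (by simpa [runLen, hz] using h)
    · simp [runLen, hz] at h; omega

-- after a run, the saved last value can never match: the loop restarts fresh
theorem loopA_fresh (thr : Int) (t : List Int) (x c : Int)
    (h : ∀ y, t.head? = some y → y ≠ x) :
    hcaLoopA t thr (some x) c = has_consecutive_answers t thr := by
  cases t with
  | nil => rfl
  | cons y rest =>
    have hyx : y ≠ x := h y rfl
    simp [hcaLoopA, has_consecutive_answers, hyx]

theorem pos_eq (thr : Int) (hthr : 1 ≤ thr) :
    ∀ (n : Nat) (l : List Int), l.length ≤ n →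
      has_consecutive_answers l thr = altLoop l thr := by
  intro n
  induction n with
  | zero =>
    intro l hl
    have : l = [] := List.eq_nil_of_length_eq_zero (by omega)
    subst this
    simp [has_consecutive_answers, hcaLoopA, altLoop]
  | succ k ih =>
    intro l hl
    cases l with
    | nil => simp [has_consecutive_answers, hcaLoopA, altLoop]
    | cons x rest =>
      have h0 : has_consecutive_answers (x :: rest) thr = hcaLoopA rest thr (some x) 1 := by
        simp [has_consecutive_answers, hcaLoopA]
      rw [h0, loopA_run thr rest x 1 (by omega),
          loopA_fresh thr _ x _ (runLen_head x rest),
          ih _ (le_trans (runLen_le x rest) (by simpa using Nat.le_of_succ_le_succ hl))]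
      rw [altLoop]
      by_cases h : ((((runLen x rest).1 + 1 : Nat) : Int) > thr)
      · rw [if_pos h]
        have h1 : (1 : Int) + (runLen x rest).1 > thr := by push_cast at h ⊢; omega
        have h2 : 1 ≤ (runLen x rest).1 := by
          by_contra hcon
          have h0' : (runLen x rest).1 = 0 := by omega
          rw [h0'] at h1; push_cast at h1; omega
        simp [h1, h2]
      · rw [if_neg h]
        have h1 : ¬ ((1 : Int) + (runLen x rest).1 > thr) := by push_cast at h ⊢; omega
        simp [h1]

-- for thr ≤ 0, A fires exactly when some adjacent pair is equal
theorem loopA_low (thr : Int) (hthr : thr ≤ 0) :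
    ∀ (l : List Int) (x c : Int), 0 ≤ c →
      hcaLoopA l thr (some x) c = !decide (List.IsChain (· ≠ ·) (x :: l)) := by
  intro l
  induction l with
  | nil => intro x c _; simp [hcaLoopA]
  | cons y rest ih =>
    intro x c hc
    by_cases hyx : y = x
    · subst hyx
      have htr : c + 1 > thr := by omega
      have hA : hcaLoopA (y :: rest) thr (some y) c = true := by
        show (if some y = some y then
                if c + 1 > thr then true else hcaLoopA rest thr (some y) (c + 1)
              else hcaLoopA rest thr (some y) 1) = true
        rw [if_pos rfl, if_pos htr]
      rw [hA]
      simp [List.isChain_cons_cons]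
    · rw [show hcaLoopA (y :: rest) thr (some x) c = hcaLoopA rest thr (some y) 1 by
            simp [hcaLoopA, hyx],
          ih y 1 (by omega)]
      have hxy : x ≠ y := fun h => hyx h.symm
      simp [List.isChain_cons_cons, hxy]

theorem A_low (thr : Int) (hthr : thr ≤ 0) (l : List Int) :
    has_consecutive_answers l thr = !decide (List.IsChain (· ≠ ·) l) := by
  cases l with
  | nil => simp [has_consecutive_answers, hcaLoopA]
  | cons x rest =>
    have h0 : has_consecutive_answers (x :: rest) thr = hcaLoopA rest thr (some x) 1 := by
      simp [has_consecutive_answers, hcaLoopA]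
    rw [h0, loopA_low thr hthr rest x 1 (by omega)]

theorem B_low (thr : Int) (hthr : thr ≤ 0) (l : List Int) (hl : l ≠ []) :
    has_consecutive_answers_alt l thr = true := by
  cases l with
  | nil => exact absurd rfl hl
  | cons x rest =>
    have h : ((((runLen x rest).1 + 1 : Nat) : Int) > thr) := by
      have : (0 : Int) ≤ ((runLen x rest).1 : Int) := Int.natCast_nonneg _
      push_cast; omega
    show altLoop (x :: rest) thr = true
    rw [altLoop, if_pos h]

-- ===== VERDICT (by name: the statement is the Claim_ definition above) =====
theorem has_consecutive_answers_spec : Claim_unchanged_has_consecutive_answers := by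
  intro series thr _ hnd
  show has_consecutive_answers series thr = has_consecutive_answers_alt series thr
  by_cases h1 : 1 ≤ thr
  · exact pos_eq thr h1 series.length series le_rfl
  · have hle : thr ≤ 0 := by omega
    unfold D_has_consecutive_answers at hnd
    push_neg at hnd
    by_cases hnil : series = []
    · subst hnil
      simp [has_consecutive_answers, hcaLoopA, has_consecutive_answers_alt, altLoop]
    · have hch : ¬ List.IsChain (· ≠ ·) series := hnd hle hnil
      rw [A_low thr hle, B_low thr hle series hnil]
      simp [hch]

theorem has_consecutive_answers_changed : Claim_changed_has_consecutive_answers := by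
  unfold Claim_changed_has_consecutive_answers
  refine ⟨by decide, by decide, by decide, ?_, by decide⟩
  simp [pvDiffWitness_has_consecutive_answers, pvDiffWitnessOut_has_consecutive_answers,
        has_consecutive_answers_alt, altLoop, runLen]

theorem has_consecutive_answers_tight : Claim_exact_has_consecutive_answers := by
  intro series thr _ hd
  obtain ⟨hle, hnil, hch⟩ := hd
  rw [A_low thr hle, B_low thr hle series hnil]
  simp [hch]
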